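-- pv_equiv track=rewrite | github.com/TheShepherd-ne/my-intervention | 3_2_get_email.py | get_email
-- ===== SOURCE A (Python) =====
-- def get_email ( email, password ) :
--
--     if "@" not in email or email.count("@") != 1:
--         return False
--
--     user, domain = email.split("@")
--
--     if len(user) == 0 or len(domain) == 0:
--         return False
--
--     if "." not in domain:
--         return False
--
--     domain_parts = domain.split(".")
--     if any(len(part) == 0 for part in domain_parts):
--         return False
--
--     if password == '' :
--         return False
--
--     return True
-- ===== SOURCE B (Python) =====
-- def get_email(email, password):
--     # single left-to-right scan: finite-state machine over the email characters
--     # states: 0 = start (user empty), 1 = in user, 2 = at start of a domain label, 3 = in a domain label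
--     state = 0
--     dots = False
--     for c in email:
--         if state == 0:
--             if c == '@':
--                 return False
--             state = 1
--         elif state == 1:
--             if c == '@':
--                 state = 2
--         elif state == 2:
--             if c == '@' or c == '.':
--                 return False
--             state = 3
--         else:
--             if c == '@':
--                 return False
--             if c == '.':
--                 state = 2
--                 dots = True
--     return state == 3 and dots and password != ''
-- ===== Notes on version B (the rewrite author's own statement) =====
-- stated objective: alternative
-- what changed: Replaced A's multi-pass membership/count/split string processing with a single left-to-right finite-state-machine scan over the email that validates user and dot-separated domain labels in one pass.
import Mathlib
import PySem

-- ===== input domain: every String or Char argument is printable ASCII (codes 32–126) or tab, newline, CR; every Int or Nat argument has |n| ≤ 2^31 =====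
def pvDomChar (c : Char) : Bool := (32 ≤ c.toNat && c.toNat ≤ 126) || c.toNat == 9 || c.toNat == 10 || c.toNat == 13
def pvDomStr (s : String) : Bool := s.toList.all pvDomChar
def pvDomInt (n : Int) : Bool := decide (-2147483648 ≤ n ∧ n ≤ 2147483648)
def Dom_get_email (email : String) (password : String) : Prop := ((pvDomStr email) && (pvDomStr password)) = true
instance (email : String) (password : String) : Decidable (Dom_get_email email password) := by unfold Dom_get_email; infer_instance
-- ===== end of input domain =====

-- B replaces A's multi-pass membership/count/split email validation by a single
-- left-to-right finite-state-machine scan over the characters (alternative decomposition, same O(n) cost).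


-- ===== PORT A =====
def get_email (email : String) (password : String) : Bool :=
  let cs := email.toList
  if !(PySem.Chars.isIn ['@'] cs) || (PySem.Chars.count cs ['@'] != 1) then false
  else
    match PySem.Chars.splitOn cs ['@'] with
    | [user, domain] =>
      if user.length == 0 || domain.length == 0 then false
      else if !(PySem.Chars.isIn ['.'] domain) then false
      else if (PySem.Chars.splitOn domain ['.']).any (fun p => p.length == 0) then false
      else if password == "" then false
      else true
    | _ => false   -- unreachable: count = 1 guarantees the split has exactly two pieces

-- ===== PORT B =====
-- states: 0 = start (user empty), 1 = in user, 2 = at start of a domain label, 3 = in a domain label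
def bLoop : List Char → Nat → Bool → Bool → Bool
  | [], state, dots, pw => state == 3 && dots && pw
  | c :: rest, state, dots, pw =>
    if state == 0 then
      if c == '@' then false else bLoop rest 1 dots pw
    else if state == 1 then
      bLoop rest (if c == '@' then 2 else 1) dots pw
    else if state == 2 then
      if c == '@' || c == '.' then false else bLoop rest 3 dots pw
    else
      if c == '@' then false
      else if c == '.' then bLoop rest 2 true pw
      else bLoop rest 3 dots pw

def get_email_alt (email : String) (password : String) : Bool :=
  bLoop email.toList 0 false (password != "")

-- ===== PRECONDITION & SPEC =====
def Spec_get_email (email : String) (password : String) (out : Bool) : Prop := out = get_email_alt email password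
instance (email : String) (password : String) (out : Bool) : Decidable (Spec_get_email email password out) := by unfold Spec_get_email; infer_instance

-- ===== CLAIM (what is proved, stated in full; the proofs are below) =====
def Claim_equal_get_email : Prop := ∀ (email : String) (password : String), Dom_get_email email password → Spec_get_email email password (get_email email password)

-- ===== LEMMAS AND PROOFS =====

-- proof-side reference splitter: what splitOn does for a single-character separator
def mySplit (c : Char) : List Char → List Char → List (List Char)
  | [], cur => [cur.reverse]
  | x :: rest, cur => if x = c then cur.reverse :: mySplit c rest [] else mySplit c rest (x :: cur)

theorem count_go_single (c : Char) :
    ∀ (cs : List Char) (fuel acc : Nat), cs.length ≤ fuel →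
      PySem.Chars.count.go [c] fuel cs acc = acc + cs.count c := by
  intro cs
  induction cs with
  | nil => intro fuel acc h; cases fuel <;> simp [PySem.Chars.count.go]
  | cons x t ih =>
    intro fuel acc h
    cases fuel with
    | zero => simp at h
    | succ f =>
      have h' : t.length ≤ f := by simp at h; omega
      simp only [PySem.Chars.count.go, List.isPrefixOf, List.drop]
      by_cases hx : x = c
      · simp [hx, ih f (acc + 1) h', List.count_cons]; omega
      · have hcx : (c == x) = false := by simp [Ne.symm hx]
        simp [hcx, ih f acc h', List.count_cons, hx]

theorem count_single (cs : List Char) (c : Char) :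
    PySem.Chars.count cs [c] = cs.count c := by
  simp [PySem.Chars.count, count_go_single c cs cs.length 0 le_rfl]

theorem isIn_single (cs : List Char) (c : Char) :
    PySem.Chars.isIn [c] cs = cs.contains c := by
  by_cases h : c ∈ cs
  · have : PySem.Chars.isIn [c] cs = true := by
      rw [PySem.Chars.isIn_iff_infix]
      obtain ⟨s, t, rfl⟩ := List.append_of_mem h
      exact ⟨s, t, by simp⟩
    simp [this, h]
  · have : PySem.Chars.isIn [c] cs = false := by
      rw [PySem.Chars.isIn_eq_false_iff]
      intro hin
      exact h (hin.mem (by simp))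
    simp [this, h]

theorem splitOn_go_single (c : Char) :
    ∀ (l : List Char) (fuel : Nat) (cur : List Char) (acc : List (List Char)), l.length ≤ fuel →
      PySem.Chars.splitOn.go [c] fuel l cur acc = acc.reverse ++ mySplit c l cur := by
  intro l
  induction l with
  | nil => intro fuel cur acc h; cases fuel <;> simp [PySem.Chars.splitOn.go, mySplit]
  | cons x t ih =>
    intro fuel cur acc h
    cases fuel with
    | zero => simp at h
    | succ f =>
      have h' : t.length ≤ f := by simp at h; omega
      simp only [PySem.Chars.splitOn.go, List.isPrefixOf, mySplit]
      by_cases hx : x = c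
      · have hcx : (c == x) = true := by simp [hx]
        simp [hcx, hx, ih f [] (cur.reverse :: acc) h']
      · have hcx : (c == x) = false := by simp [Ne.symm hx]
        simp [hcx, ih f (x :: cur) acc h', hx]

theorem splitOn_single (cs : List Char) (c : Char) :
    PySem.Chars.splitOn cs [c] = mySplit c cs [] := by
  simpa using splitOn_go_single c cs (cs.length + 1) [] [] (by omega)

theorem mySplit_no (c : Char) :
    ∀ (u cur : List Char), c ∉ u → mySplit c u cur = [cur.reverse ++ u] := by
  intro u
  induction u with
  | nil => intro cur h; simp [mySplit]
  | cons x t ih =>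
    intro cur h
    simp only [List.mem_cons, not_or] at h
    simp [mySplit, Ne.symm h.1, ih (x :: cur) h.2]

theorem mySplit_across (c : Char) :
    ∀ (u d cur : List Char), c ∉ u →
      mySplit c (u ++ c :: d) cur = (cur.reverse ++ u) :: mySplit c d [] := by
  intro u
  induction u with
  | nil => intro d cur h; simp [mySplit]
  | cons x t ih =>
    intro d cur h
    simp only [List.mem_cons, not_or] at h
    simp [mySplit, Ne.symm h.1, ih d (x :: cur) h.2]

theorem bLoop_skip1 :
    ∀ (u l : List Char) (dots pw : Bool), '@' ∉ u →
      bLoop (u ++ l) 1 dots pw = bLoop l 1 dots pw := by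
  intro u
  induction u with
  | nil => intro l dots pw h; rfl
  | cons x t ih =>
    intro l dots pw h
    simp only [List.mem_cons, not_or] at h
    have hx : (x == '@') = false := beq_eq_false_iff_ne.mpr (Ne.symm h.1)
    simp [bLoop, hx, ih l dots pw h.2]

theorem bLoop_domain :
    ∀ (n : Nat) (d : List Char) (dots pw : Bool), d.length ≤ n →
      (bLoop d 2 dots pw =
        ((!d.contains '@') && !((mySplit '.' d []).any (fun p => p.length == 0)) &&
          (dots || d.contains '.') && pw)) ∧
      (∀ cur : List Char, cur ≠ [] → bLoop d 3 dots pw =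
        ((!d.contains '@') && !((mySplit '.' d cur).any (fun p => p.length == 0)) &&
          (dots || d.contains '.') && pw)) := by
  intro n
  induction n with
  | zero =>
    intro d dots pw h
    have : d = [] := List.length_eq_zero_iff.mp (Nat.le_zero.mp h)
    subst this
    refine ⟨by simp [bLoop, mySplit], ?_⟩
    intro cur hcur
    have hc : (cur.length == 0) = false := by simp [List.length_eq_zero_iff, hcur]
    simp [bLoop, mySplit, hc]
  | succ n ih =>
    intro d dots pw h
    cases d with
    | nil =>
      refine ⟨by simp [bLoop, mySplit], ?_⟩
      intro cur hcur
      have hc : (cur.length == 0) = false := by simp [List.length_eq_zero_iff, hcur]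
      simp [bLoop, mySplit, hc]
    | cons x t =>
      have h' : t.length ≤ n := by simp at h; omega
      constructor
      · -- state 2
        by_cases hx : x = '@'
        · subst hx; simp [bLoop, mySplit]
        · by_cases hd : x = '.'
          · subst hd; simp [bLoop, mySplit]
          · have h3 := (ih t dots pw h').2 [x] (by simp)
            simp only [bLoop, mySplit]
            simp [hx, hd, h3, Ne.symm hx, Ne.symm hd]
      · -- state 3
        intro cur hcur
        have hc : (cur.length == 0) = false := by simp [List.length_eq_zero_iff, hcur]
        by_cases hx : x = '@'
        · subst hx; simp [bLoop, mySplit]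
        · by_cases hd : x = '.'
          · subst hd
            have h2 := (ih t true pw h').1
            simp only [bLoop, mySplit]
            simp [h2, hc]
          · have h3 := (ih t dots pw h').2 (x :: cur) (by simp)
            simp only [bLoop, mySplit]
            simp [hx, hd, h3, Ne.symm hx, Ne.symm hd]

theorem dropWhile_head_not (p : Char → Bool) :
    ∀ (l : List Char) (y : Char) (e : List Char), l.dropWhile p = y :: e → p y = false := by
  intro l
  induction l with
  | nil => intro y e h; simp at h
  | cons x t ih =>
    intro y e h
    by_cases hp : p x
    · rw [List.dropWhile_cons_of_pos hp] at h
      exact ih y e h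
    · rw [List.dropWhile_cons_of_neg hp] at h
      cases h
      simpa using hp

theorem main_eq (email password : String) :
    get_email email password = get_email_alt email password := by
  unfold get_email get_email_alt
  set cs := email.toList with hcs
  set pw := password != "" with hpw
  by_cases hmem : '@' ∈ cs
  · -- '@' occurs: split at its first occurrence
    set u := cs.takeWhile (fun x => x ≠ '@') with hu_def
    set d' := cs.dropWhile (fun x => x ≠ '@') with hd'_def
    have hsplit : u ++ d' = cs := List.takeWhile_append_dropWhile
    have hu : '@' ∉ u := by
      intro h
      have := List.mem_takeWhile_imp h
      simp at this
    have hd'ne : d' ≠ [] := by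
      intro h
      rw [h, List.append_nil] at hsplit
      exact absurd (hsplit ▸ hmem) hu
    obtain ⟨d, hd⟩ : ∃ d, d' = '@' :: d := by
      cases hcase : d' with
      | nil => exact absurd hcase hd'ne
      | cons y e =>
        have hy := dropWhile_head_not (fun x => decide (x ≠ '@')) cs y e (by rw [← hd'_def]; exact hcase)
        simp at hy
        exact ⟨e, by rw [hy]⟩
    rw [hd] at hsplit
    have hcount : cs.count '@' = d.count '@' + 1 := by
      rw [← hsplit]
      simp [List.count_append, List.count_eq_zero.mpr hu]
    cases hu0 : u with
    | nil =>
      -- email starts with '@': both false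
      rw [hu0] at hsplit; simp at hsplit
      rw [← hsplit]
      have hB : bLoop ('@' :: d) 0 false pw = false := by simp [bLoop]
      rw [hB]
      by_cases hcd : d.count '@' = 0
      · have h1 : PySem.Chars.count ('@' :: d) ['@'] = 1 := by
          rw [count_single]; simp [List.count_cons, List.count_eq_zero.mpr, hcd]
        have hsp : PySem.Chars.splitOn ('@' :: d) ['@'] = [[], d] := by
          rw [splitOn_single]
          show mySplit '@' ([] ++ '@' :: d) [] = _
          rw [mySplit_across '@' [] d [] (by simp), mySplit_no '@' d [] (List.count_eq_zero.mp hcd)]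
          simp
        simp [h1, hsp]
      · have h1 : PySem.Chars.count ('@' :: d) ['@'] ≠ 1 := by
          rw [count_single]; simp [List.count_cons]; omega
        simp [h1]
    | cons x u' =>
      have hxne : x ≠ '@' := by rw [hu0] at hu; simp at hu; exact Ne.symm hu.1
      have hu'ne : '@' ∉ u' := by rw [hu0] at hu; simp at hu; exact fun h => hu.2 h
      -- B side reduces to the domain machine
      have hB : bLoop cs 0 false pw = bLoop d 2 false pw := by
        rw [← hsplit, hu0]
        have hx : (x == '@') = false := beq_eq_false_iff_ne.mpr hxne
        show bLoop (x :: (u' ++ '@' :: d)) 0 false pw = _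
        simp only [bLoop, hx]
        simp only [show ((0:Nat) == 0) = true from rfl, if_true, if_false, Bool.false_eq_true]
        rw [bLoop_skip1 u' ('@' :: d) false pw hu'ne]
        simp [bLoop]
      rw [hB]
      by_cases hdin : '@' ∈ d
      · -- two or more '@': A false, machine dies on the second '@'
        have h1 : PySem.Chars.count cs ['@'] ≠ 1 := by
          rw [count_single, hcount]
          have := List.count_pos_iff.mpr hdin
          omega
        have hBd : bLoop d 2 false pw = false := by
          rw [(bLoop_domain d.length d false pw le_rfl).1]
          simp [hdin]
        simp [h1, hBd]
      · -- exactly one '@'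
        have h1 : PySem.Chars.count cs ['@'] = 1 := by
          rw [count_single, hcount, List.count_eq_zero.mpr hdin]
        have hii : PySem.Chars.isIn ['@'] cs = true := by
          rw [isIn_single]; simp [hmem]
        have hsp : PySem.Chars.splitOn cs ['@'] = [u, d] := by
          rw [splitOn_single, ← hsplit, mySplit_across '@' u d [] hu,
              mySplit_no '@' d [] hdin]
          simp
        rw [(bLoop_domain d.length d false pw le_rfl).1]
        simp only [hii, h1, hsp]
        have hul : (u.length == 0) = false := by rw [hu0]; simp
        cases d with
        | nil => simp [hul, mySplit]
        | cons y e =>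
          have hdl : ((y :: e).length == 0) = false := by simp
          simp only [hul, hdl, Bool.or_self, Bool.false_or, if_false]
          rw [isIn_single, splitOn_single]
          cases hc : ((y :: e).contains '.') <;>
            cases ha : ((mySplit '.' (y :: e) []).any fun p => p.length == 0) <;>
              cases hpe : password == "" <;>
                simp [hc, ha, hpe, hpw] <;> simp_all
  · -- no '@': both false
    have hii : PySem.Chars.isIn ['@'] cs = false := by
      rw [isIn_single]; simp [hmem]
    have hB : bLoop cs 0 false pw = false := by
      cases hc : cs with
      | nil => rfl
      | cons x t =>
        rw [hc] at hmem
        simp only [List.mem_cons, not_or] at hmem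
        have hx : (x == '@') = false := beq_eq_false_iff_ne.mpr (fun e => hmem.1 e.symm)
        simp only [bLoop, hx]
        have := bLoop_skip1 t [] false pw (fun h => hmem.2 h)
        simp at this
        simp [this, bLoop]
    simp [hii, hB]

-- ===== VERDICT (by name: the statement is the Claim_ definition above) =====
theorem get_email_spec : Claim_equal_get_email := by
  intro email password _
  exact main_eq email password
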